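-- pv_equiv track=rewrite | github.com/AnnaGlid/experiments | Rule.py | choose_shortest_rules
-- ===== SOURCE A (Python) =====
-- def __rule_length(rule):
--     # return the number of attributes in a rule
--     # minus one because of the decision
--     return rule.count('=') - 1
--
-- def choose_shortest_rules(rules_list):
--     min_length = 100
--     result = []
--     for rule in rules_list:
--         if __rule_length(rule) < min_length:
--             result.clear()
--             min_length = __rule_length(rule)
--         if __rule_length(rule) == min_length:
--             result.append(rule)
--     return result
-- ===== SOURCE B (Python) =====
-- def choose_shortest_rules(rules_list):
--     if not rules_list:
--         return []
--     min_count = min(rule.count('=') for rule in rules_list)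
--     return [rule for rule in rules_list if rule.count('=') == min_count]
-- ===== Notes on version B (the rewrite author's own statement) =====
-- stated objective: simpler
-- what changed: B computes the minimum attribute count up front with min() and returns the rules attaining it with a separate filter pass, instead of A's running-minimum scan with clear/append bookkeeping.
-- intended difference: On nonempty lists where every rule contains at least 102 '=' characters, A's running minimum never beats its arbitrary seed 100 so A returns no rules at all, while B returns the rules with the fewest '=' characters, which is the intended shortest-rules answer. — e.g. on choose_shortest_rules(["======================================================================================================"]): A returns [], B returns ["======================================================================================================"]
import Mathlib
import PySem

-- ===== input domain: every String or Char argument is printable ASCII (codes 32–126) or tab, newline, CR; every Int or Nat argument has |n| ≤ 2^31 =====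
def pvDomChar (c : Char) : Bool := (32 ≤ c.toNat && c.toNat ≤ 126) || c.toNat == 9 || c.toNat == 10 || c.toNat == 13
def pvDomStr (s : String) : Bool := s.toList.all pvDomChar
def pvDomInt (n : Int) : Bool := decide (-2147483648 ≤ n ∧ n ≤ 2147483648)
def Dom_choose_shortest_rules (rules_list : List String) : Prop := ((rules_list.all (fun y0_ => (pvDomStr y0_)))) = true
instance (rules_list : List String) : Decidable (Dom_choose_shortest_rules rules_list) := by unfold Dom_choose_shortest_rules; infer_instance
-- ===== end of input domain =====

-- B replaces A's running-min scan (seeded with the magic 100) by a guard + min + filter; B returns the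
-- truly shortest rules where A's 100-seed makes it return [] (objective: simpler; see D_ below).

-- ===== PORT A =====
def ruleLength (rule : String) : Int := (PySem.Str.count rule "=" : Int) - 1

def choose_shortest_rules (rules_list : List String) : List String :=
  (rules_list.foldl
    (fun (st : Int × List String) rule =>
      let st := if ruleLength rule < st.1 then (ruleLength rule, ([] : List String)) else st
      if ruleLength rule = st.1 then (st.1, st.2 ++ [rule]) else st)
    (100, [])).2

-- ===== PORT B =====
def choose_shortest_rules_alt (rules_list : List String) : List String :=
  match rules_list with
  | [] => []
  | _ :: _ =>
    match PySem.List.min? (rules_list.map (fun rule => (PySem.Str.count rule "=" : Int))) (fun x => x) with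
    | none => []
    | some m => rules_list.filter (fun rule => (PySem.Str.count rule "=" : Int) = m)

-- ===== PRECONDITION & SPEC =====
-- On nonempty lists in which EVERY rule contains at least 102 '=' characters, A's running minimum
-- never drops below its arbitrary seed 100, so A returns no rules at all; B returns the rules with the fewest
-- '=' characters, which is the intended "shortest rules" answer.
def D_choose_shortest_rules (rules_list : List String) : Prop :=
  rules_list ≠ [] ∧ ∀ r ∈ rules_list, 102 ≤ PySem.Str.count r "="
instance (rules_list : List String) : Decidable (D_choose_shortest_rules rules_list) := by
  unfold D_choose_shortest_rules; infer_instance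

def Spec_choose_shortest_rules (rules_list : List String) (out : List String) : Prop :=
  ¬ D_choose_shortest_rules rules_list → out = choose_shortest_rules_alt rules_list
instance (rules_list : List String) (out : List String) : Decidable (Spec_choose_shortest_rules rules_list out) := by
  unfold Spec_choose_shortest_rules; infer_instance

def pvDiffWitness_choose_shortest_rules : List String := ["======================================================================================================"]
def pvDiffWitnessOut_choose_shortest_rules : (List String) × (List String) :=
  ([], ["======================================================================================================"])

-- ===== CLAIM (what is proved, stated in full; the proofs are below) =====
def Claim_unchanged_choose_shortest_rules : Prop := ∀ (rules_list : List String), Dom_choose_shortest_rules rules_list → Spec_choose_shortest_rules rules_list (choose_shortest_rules rules_list)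
def Claim_changed_choose_shortest_rules : Prop := Dom_choose_shortest_rules (pvDiffWitness_choose_shortest_rules) ∧ D_choose_shortest_rules (pvDiffWitness_choose_shortest_rules) ∧ choose_shortest_rules (pvDiffWitness_choose_shortest_rules) = pvDiffWitnessOut_choose_shortest_rules.1 ∧ choose_shortest_rules_alt (pvDiffWitness_choose_shortest_rules) = pvDiffWitnessOut_choose_shortest_rules.2 ∧ pvDiffWitnessOut_choose_shortest_rules.1 ≠ pvDiffWitnessOut_choose_shortest_rules.2
def Claim_exact_choose_shortest_rules : Prop := ∀ (rules_list : List String), Dom_choose_shortest_rules rules_list → D_choose_shortest_rules rules_list → choose_shortest_rules rules_list ≠ choose_shortest_rules_alt rules_list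

-- ===== LEMMAS AND PROOFS =====

def stepA (st : Int × List String) (rule : String) : Int × List String :=
  let st := if ruleLength rule < st.1 then (ruleLength rule, ([] : List String)) else st
  if ruleLength rule = st.1 then (st.1, st.2 ++ [rule]) else st

theorem stepA_lt (m : Int) (res : List String) (r : String) (h : ruleLength r < m) :
    stepA (m, res) r = (ruleLength r, [r]) := by
  simp [stepA, h]

theorem stepA_eq (m : Int) (res : List String) (r : String) (h : ruleLength r = m) :
    stepA (m, res) r = (m, res ++ [r]) := by
  simp [stepA, h]

theorem stepA_gt (m : Int) (res : List String) (r : String) (h : m < ruleLength r) :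
    stepA (m, res) r = (m, res) := by
  have h1 : ¬ ruleLength r < m := by omega
  have h2 : ¬ ruleLength r = m := by omega
  simp [stepA, h1, h2]

theorem fm_min (t : List Int) (a b : Int) :
    t.foldl min (min a b) = min a (t.foldl min b) := by
  induction t generalizing b with
  | nil => rfl
  | cons c t ih =>
    simp only [List.foldl_cons]
    rw [min_assoc, ih]

theorem fm_le_init (t : List Int) (a : Int) : t.foldl min a ≤ a := by
  have h := fm_min t a a
  rw [min_self] at h
  omega

theorem fm_le_mem (t : List Int) (a c : Int) (hc : c ∈ t) : t.foldl min a ≤ c := by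
  induction t generalizing a with
  | nil => cases hc
  | cons x t ih =>
    rcases List.mem_cons.mp hc with h | h
    · subst h
      have h1 := fm_le_init t (min a c)
      simp only [List.foldl_cons]
      omega
    · exact ih _ h

theorem fm_mem (t : List Int) (a : Int) : t.foldl min a = a ∨ t.foldl min a ∈ t := by
  induction t generalizing a with
  | nil => left; rfl
  | cons x t ih =>
    simp only [List.foldl_cons]
    rcases ih (min a x) with h | h
    · by_cases hax : a ≤ x
      · left; omega
      · right
        have hx : min a x = x := by omega
        rw [h, hx]
        simp
    · right; right; exact h

theorem fm_ge (t : List Int) (a k : Int) (ha : k ≤ a) (ht : ∀ c ∈ t, k ≤ c) :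
    k ≤ t.foldl min a := by
  induction t generalizing a with
  | nil => exact ha
  | cons x t ih =>
    simp only [List.foldl_cons]
    exact ih _ (by have := ht x (by simp); omega) (fun c hc => ht c (by simp [hc]))

-- characterisation of A's fold: running min plus the rules attaining it
theorem foldA_eq (l : List String) (m : Int) (res : List String) :
    (l.foldl stepA (m, res)) =
    ((l.map ruleLength).foldl min m,
      (if (l.map ruleLength).foldl min m < m then [] else res)
        ++ l.filter (fun r => ruleLength r = (l.map ruleLength).foldl min m)) := by
  induction l generalizing m res with
  | nil => simp
  | cons r t ih =>
    simp only [List.foldl_cons, List.map_cons, List.filter_cons]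
    rcases lt_trichotomy (ruleLength r) m with h1 | h1 | h1
    · rw [stepA_lt m res r h1, ih]
      have hM : (t.map ruleLength).foldl min (min m (ruleLength r))
          = (t.map ruleLength).foldl min (ruleLength r) := by
        rw [fm_min]
        have := fm_le_init (t.map ruleLength) (ruleLength r)
        omega
      simp only [hM]
      set Mt := (t.map ruleLength).foldl min (ruleLength r) with hMt
      have hle : Mt ≤ ruleLength r := fm_le_init _ _
      have hlt : Mt < m := by omega
      by_cases h2 : Mt < ruleLength r
      · have hne : ¬ (ruleLength r = Mt) := by omega
        simp [h2, hne, hlt]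
      · have he : ruleLength r = Mt := by omega
        simp [he, hlt]
    · subst h1
      rw [stepA_eq _ res r rfl, ih]
      simp only [min_self]
      set Mt := (t.map ruleLength).foldl min (ruleLength r) with hMt
      have hle : Mt ≤ ruleLength r := fm_le_init _ _
      by_cases h2 : Mt < ruleLength r
      · have hne : ¬ (ruleLength r = Mt) := by omega
        simp [h2, hne]
      · have he : ruleLength r = Mt := by omega
        simp [← he]
    · rw [stepA_gt m res r h1, ih]
      have hM : min m (ruleLength r) = m := by omega
      simp only [hM]
      set Mt := (t.map ruleLength).foldl min m with hMt
      have hle : Mt ≤ m := fm_le_init _ _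
      have hne : ¬ (ruleLength r = Mt) := by omega
      simp [hne]

theorem A_eq_filter (l : List String) :
    choose_shortest_rules l
      = l.filter (fun r => ruleLength r = (l.map ruleLength).foldl min 100) := by
  have hstep : choose_shortest_rules l = (l.foldl stepA (100, [])).2 := rfl
  rw [hstep, foldA_eq]
  split <;> simp

theorem B_eq_filter (x : String) (t : List String) :
    choose_shortest_rules_alt (x :: t)
      = (x :: t).filter (fun r => (PySem.Str.count r "=" : Int)
          = (t.map (fun rule => (PySem.Str.count rule "=" : Int))).foldl min ((PySem.Str.count x "=" : Int))) := by
  unfold choose_shortest_rules_alt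
  simp only [List.map_cons, PySem.List.min?_id_cons]

-- relate A's shifted (count - 1) running min to B's running min over counts
theorem len_min_shift (t : List String) (a : Int) :
    (t.map ruleLength).foldl min (a - 1)
      = (t.map (fun r => (PySem.Str.count r "=" : Int))).foldl min a - 1 := by
  induction t generalizing a with
  | nil => rfl
  | cons x t ih =>
    simp only [List.map_cons, List.foldl_cons]
    have h1 : min (a - 1) (ruleLength x)
        = min a (PySem.Str.count x "=" : Int) - 1 := by
      unfold ruleLength; omega
    rw [h1, ih]

-- ===== VERDICT (by name: the statement is the Claim_ definition above) =====
theorem choose_shortest_rules_spec : Claim_unchanged_choose_shortest_rules := by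
  intro l _ hnD
  cases l with
  | nil => rfl
  | cons x t =>
    rw [A_eq_filter, B_eq_filter]
    -- the minimum count over the whole list
    set MB := (t.map (fun r => (PySem.Str.count r "=" : Int))).foldl min ((PySem.Str.count x "=" : Int)) with hMB
    -- MB ≤ 101 since some rule has at most 101 '='
    have hMB_le : MB ≤ 101 := by
      unfold D_choose_shortest_rules at hnD
      push Not at hnD
      obtain ⟨r, hr, hcnt⟩ := hnD (by simp)
      have hcnt' : (PySem.Str.count r "=" : Int) ≤ 101 := by
        have : PySem.Str.count r "=" ≤ 101 := by omega
        exact_mod_cast this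
      rcases List.mem_cons.mp hr with h | h
      · rw [h] at hcnt'
        have := fm_le_init (t.map (fun r => (PySem.Str.count r "=" : Int))) ((PySem.Str.count x "=" : Int))
        omega
      · have := fm_le_mem (t.map (fun r => (PySem.Str.count r "=" : Int)))
          ((PySem.Str.count x "=" : Int)) ((PySem.Str.count r "=" : Int)) (by exact List.mem_map_of_mem h)
        omega
    -- A's min: foldl over (x::t) starting at 100 equals MB - 1
    have hA : ((x :: t).map ruleLength).foldl min 100 = MB - 1 := by
      simp only [List.map_cons, List.foldl_cons]
      have h100 : min (100 : Int) (ruleLength x)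
          = min 101 (PySem.Str.count x "=" : Int) - 1 := by
        unfold ruleLength; omega
      rw [h100, len_min_shift, fm_min]
      omega
    rw [hA]
    apply List.filter_congr
    intro r _
    unfold ruleLength
    simp only [decide_eq_decide]
    omega

set_option maxRecDepth 40000 in
theorem choose_shortest_rules_changed : Claim_changed_choose_shortest_rules := by
  unfold Claim_changed_choose_shortest_rules; decide

theorem choose_shortest_rules_tight : Claim_exact_choose_shortest_rules := by
  intro l _ hD
  obtain ⟨hne, hall⟩ := hD
  cases l with
  | nil => exact absurd rfl hne
  | cons x t =>
    rw [A_eq_filter, B_eq_filter]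
    have hall' : ∀ r ∈ x :: t, (102 : Int) ≤ (PySem.Str.count r "=" : Int) := by
      intro r hr
      exact_mod_cast hall r hr
    have hM : ((x :: t).map ruleLength).foldl min 100 = 100 := by
      have hge : (100 : Int) ≤ ((x :: t).map ruleLength).foldl min 100 := by
        apply fm_ge _ _ _ le_rfl
        intro c hc
        obtain ⟨r, hr, rfl⟩ := List.mem_map.mp hc
        have := hall' r hr
        unfold ruleLength
        omega
      have hle := fm_le_init ((x :: t).map ruleLength) 100
      omega
    have hAnil : (x :: t).filter
        (fun r => ruleLength r = ((x :: t).map ruleLength).foldl min 100) = [] := by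
      rw [hM]
      apply List.filter_eq_nil_iff.mpr
      intro r hr
      have := hall' r hr
      unfold ruleLength
      simp only [decide_eq_true_eq]
      omega
    set MB := (t.map (fun rule => (PySem.Str.count rule "=" : Int))).foldl min ((PySem.Str.count x "=" : Int)) with hMB
    have hex : ∃ r ∈ x :: t, (PySem.Str.count r "=" : Int) = MB := by
      rcases fm_mem (t.map (fun rule => (PySem.Str.count rule "=" : Int))) ((PySem.Str.count x "=" : Int)) with h | h
      · exact ⟨x, by simp, h.symm⟩
      · obtain ⟨r, hr, hcnt⟩ := List.mem_map.mp h
        exact ⟨r, by simp [hr], hcnt⟩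
    obtain ⟨r, hr, hcnt⟩ := hex
    have hBne : (x :: t).filter
        (fun rule => (PySem.Str.count rule "=" : Int) = MB) ≠ [] := by
      apply List.ne_nil_of_mem (a := r)
      exact List.mem_filter.mpr ⟨hr, decide_eq_true hcnt⟩
    rw [hAnil]
    exact (Ne.symm hBne)
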